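-- pv_equiv track=rewrite | github.com/tyhhuynh/naruto-seals | gradio/app.py | check_chidori_sequence
-- ===== SOURCE A (Python) =====
-- REQUIRED_DETECTIONS = 2
--
-- def check_chidori_sequence(history):
--     """
--     Check if the prediction history contains the Chidori sequence: Ox → Hare → Monkey
--     Each seal must appear at least REQUIRED_DETECTIONS times in the sequence.
--     """
--     if len(history) < REQUIRED_DETECTIONS * 3:
--         return False
--
--     ox_count = 0
--     hare_count = 0
--     monkey_count = 0
--     state = "looking_for_ox"
--
--     for seal in history:
--         if state == "looking_for_ox" and seal == "ox":
--             ox_count += 1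
--             if ox_count >= REQUIRED_DETECTIONS:
--                 state = "looking_for_hare"
--         elif state == "looking_for_hare" and seal == "hare":
--             hare_count += 1
--             if hare_count >= REQUIRED_DETECTIONS:
--                 state = "looking_for_monkey"
--         elif state == "looking_for_monkey" and seal == "monkey":
--             monkey_count += 1
--             if monkey_count >= REQUIRED_DETECTIONS:
--                 return True
--
--     return False
-- ===== SOURCE B (Python) =====
-- REQUIRED_DETECTIONS = 2
--
-- def check_chidori_sequence(history):
--     if len(history) < REQUIRED_DETECTIONS * 3:
--         return False
--     i = 0
--     for seal in ("ox", "hare", "monkey"):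
--         count = 0
--         while count < REQUIRED_DETECTIONS:
--             if i >= len(history):
--                 return False
--             if history[i] == seal:
--                 count += 1
--             i += 1
--     return True
-- ===== Notes on version B (the rewrite author's own statement) =====
-- stated objective: simpler
-- what changed: Replaces the explicit three-state string state machine with three per-seal phases driven by a single index pointer that scans forward counting occurrences of the current target seal.
import Mathlib
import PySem

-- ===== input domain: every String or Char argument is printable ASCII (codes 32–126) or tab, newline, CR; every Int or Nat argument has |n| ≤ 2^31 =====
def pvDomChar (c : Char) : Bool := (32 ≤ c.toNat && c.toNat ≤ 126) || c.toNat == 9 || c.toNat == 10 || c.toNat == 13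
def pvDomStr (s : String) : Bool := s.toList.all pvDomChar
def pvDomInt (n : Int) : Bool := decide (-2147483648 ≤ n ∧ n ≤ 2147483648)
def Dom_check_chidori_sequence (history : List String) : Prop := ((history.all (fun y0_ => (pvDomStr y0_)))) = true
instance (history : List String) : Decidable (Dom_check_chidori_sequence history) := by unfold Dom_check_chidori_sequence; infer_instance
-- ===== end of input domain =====

-- B replaces A's three-state string state machine by three sequential per-seal scans over a
-- suffix pointer (objective: simpler decomposition, same O(n) cost).


-- ===== PORT A =====
def chidoriLoopA : List String → Int → Int → Int → String → Bool
  | [], _, _, _, _ => false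
  | sl :: rest, ox_count, hare_count, monkey_count, state =>
    if state == "looking_for_ox" && sl == "ox" then
      let ox_count := ox_count + 1
      if ox_count ≥ 2 then chidoriLoopA rest ox_count hare_count monkey_count "looking_for_hare"
      else chidoriLoopA rest ox_count hare_count monkey_count state
    else if state == "looking_for_hare" && sl == "hare" then
      let hare_count := hare_count + 1
      if hare_count ≥ 2 then chidoriLoopA rest ox_count hare_count monkey_count "looking_for_monkey"
      else chidoriLoopA rest ox_count hare_count monkey_count state
    else if state == "looking_for_monkey" && sl == "monkey" then
      let monkey_count := monkey_count + 1
      if monkey_count ≥ 2 then true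
      else chidoriLoopA rest ox_count hare_count monkey_count state
    else chidoriLoopA rest ox_count hare_count monkey_count state

def check_chidori_sequence (history : List String) : Bool :=
  if (history.length : Int) < 2 * 3 then false
  else chidoriLoopA history 0 0 0 "looking_for_ox"

-- ===== PORT B =====
-- B: consume the suffix until `need` occurrences of `seal` were seen; none = pointer exhausted
def chidoriConsume (target : String) : Int → List String → Option (List String)
  | need, xs =>
    if need ≤ 0 then some xs
    else match xs with
      | [] => none
      | x :: rest => chidoriConsume target (if x == target then need - 1 else need) rest

def check_chidori_sequence_alt (history : List String) : Bool :=
  if (history.length : Int) < 2 * 3 then false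
  else
    (((chidoriConsume "ox" 2 history).bind (chidoriConsume "hare" 2)).bind
      (chidoriConsume "monkey" 2)).isSome

-- ===== PRECONDITION & SPEC =====
def Spec_check_chidori_sequence (history : List String) (out : Bool) : Prop := out = check_chidori_sequence_alt history
instance (history : List String) (out : Bool) : Decidable (Spec_check_chidori_sequence history out) := by unfold Spec_check_chidori_sequence; infer_instance

-- ===== CLAIM (what is proved, stated in full; the proofs are below) =====
def Claim_equal_check_chidori_sequence : Prop := ∀ (history : List String), Dom_check_chidori_sequence history → Spec_check_chidori_sequence history (check_chidori_sequence history)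

-- ===== LEMMAS AND PROOFS =====

lemma consume_step (target : String) (need : Int) (x : String) (rest : List String)
    (h : ¬ need ≤ 0) :
    chidoriConsume target need (x :: rest) =
      chidoriConsume target (if x == target then need - 1 else need) rest := by
  rw [chidoriConsume.eq_def]; simp [h]

lemma consume_done (target : String) (need : Int) (xs : List String) (h : need ≤ 0) :
    chidoriConsume target need xs = some xs := by
  rw [chidoriConsume.eq_def]; simp [h]

lemma phase_monkey (xs : List String) (m ox hare : Int) (hm : m < 2) :
    chidoriLoopA xs ox hare m "looking_for_monkey" = (chidoriConsume "monkey" (2 - m) xs).isSome := by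
  induction xs generalizing m with
  | nil => rw [chidoriLoopA, chidoriConsume]; simp; omega
  | cons x rest ih =>
    rw [chidoriLoopA, consume_step _ _ _ _ (by omega)]
    simp only [show (("looking_for_monkey" : String) == "looking_for_ox") = false from by decide,
      show (("looking_for_monkey" : String) == "looking_for_hare") = false from by decide,
      show (("looking_for_monkey" : String) == "looking_for_monkey") = true from by decide,
      Bool.false_and, Bool.true_and, Bool.false_eq_true, if_false]
    by_cases hx : (x == "monkey") = true
    · simp only [hx, if_true]
      by_cases h2 : m + 1 ≥ 2
      · rw [if_pos h2, consume_done "monkey" (2 - m - 1) rest (by omega)]; rfl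
      · rw [if_neg h2, ih (m + 1) (by omega),
          show (2:Int) - (m + 1) = 2 - m - 1 from by ring]
    · simp only [hx]
      exact ih m hm

lemma phase_hare (xs : List String) (h ox : Int) (hh : h < 2) :
    chidoriLoopA xs ox h 0 "looking_for_hare" =
      ((chidoriConsume "hare" (2 - h) xs).bind (chidoriConsume "monkey" 2)).isSome := by
  induction xs generalizing h with
  | nil => rw [chidoriLoopA, chidoriConsume]; simp; omega
  | cons x rest ih =>
    rw [chidoriLoopA, consume_step _ _ _ _ (by omega)]
    simp only [show (("looking_for_hare" : String) == "looking_for_ox") = false from by decide,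
      show (("looking_for_hare" : String) == "looking_for_hare") = true from by decide,
      show (("looking_for_hare" : String) == "looking_for_monkey") = false from by decide,
      Bool.false_and, Bool.true_and, Bool.false_eq_true, if_false]
    by_cases hx : (x == "hare") = true
    · simp only [hx, if_true]
      by_cases h2 : h + 1 ≥ 2
      · rw [if_pos h2, consume_done "hare" (2 - h - 1) rest (by omega)]
        simp only [Option.bind_some]
        exact phase_monkey rest 0 ox (h + 1) (by omega)
      · rw [if_neg h2, ih (h + 1) (by omega),
          show (2:Int) - (h + 1) = 2 - h - 1 from by ring]
    · simp only [hx]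
      exact ih h hh

lemma phase_ox (xs : List String) (o : Int) (ho : o < 2) :
    chidoriLoopA xs o 0 0 "looking_for_ox" =
      (((chidoriConsume "ox" (2 - o) xs).bind (chidoriConsume "hare" 2)).bind
        (chidoriConsume "monkey" 2)).isSome := by
  induction xs generalizing o with
  | nil =>
    rw [chidoriLoopA, chidoriConsume.eq_def]
    simp [show ¬ ((2:Int) - o ≤ 0) from by omega]
  | cons x rest ih =>
    rw [chidoriLoopA, consume_step _ _ _ _ (by omega)]
    simp only [show (("looking_for_ox" : String) == "looking_for_ox") = true from by decide,
      show (("looking_for_ox" : String) == "looking_for_hare") = false from by decide,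
      show (("looking_for_ox" : String) == "looking_for_monkey") = false from by decide,
      Bool.false_and, Bool.true_and, Bool.false_eq_true, if_false]
    by_cases hx : (x == "ox") = true
    · simp only [hx, if_true]
      by_cases h2 : o + 1 ≥ 2
      · rw [if_pos h2, consume_done "ox" (2 - o - 1) rest (by omega)]
        simp only [Option.bind_some]
        exact phase_hare rest 0 (o + 1) (by omega)
      · rw [if_neg h2, ih (o + 1) (by omega),
          show (2:Int) - (o + 1) = 2 - o - 1 from by ring]
    · simp only [hx]
      exact ih o ho

-- ===== VERDICT =====
theorem check_chidori_sequence_spec : Claim_equal_check_chidori_sequence := by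
  intro history _
  unfold Spec_check_chidori_sequence check_chidori_sequence check_chidori_sequence_alt
  by_cases hl : (history.length : Int) < 2 * 3
  · rw [if_pos hl, if_pos hl]
  · rw [if_neg hl, if_neg hl]
    exact phase_ox history 0 (by omega)
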